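-- pv_equiv track=rewrite | github.com/JMarvi3/practice_problems | countries.py | countries_with_only_one_vowel
-- ===== SOURCE A (Python) =====
-- from typing import List
--
-- def countries_with_only_one_vowel(countries: List[str]):
--     vowels = set('aeiou')
--     len_vowels = len(vowels)
--     results = []
--     for country in countries:
--         number_of_vowels = len_vowels - len(vowels - set(country.lower()))
--         if number_of_vowels == 1:
--             results.append(country)
--     return results
-- ===== SOURCE B (Python) =====
-- from typing import List
--
-- VOWELS = ('a', 'e', 'i', 'o', 'u')
--
-- def _single_vowel(chars):
--     # one pass with early exit: remember the first vowel seen; a second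
--     # distinct vowel rejects immediately
--     seen = None
--     for ch in chars:
--         if ch in VOWELS:
--             if seen is None:
--                 seen = ch
--             elif ch != seen:
--                 return False
--     return seen is not None
--
-- def countries_with_only_one_vowel(countries: List[str]):
--     return [c for c in countries if _single_vowel(c.lower())]
-- ===== Notes on version B (the rewrite author's own statement) =====
-- stated objective: alternative
-- what changed: B replaces A's set construction and set subtraction per country by a single-pass state machine over the string's characters that remembers the first vowel seen and rejects early on a second distinct vowel (no sets built).
import Mathlib
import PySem

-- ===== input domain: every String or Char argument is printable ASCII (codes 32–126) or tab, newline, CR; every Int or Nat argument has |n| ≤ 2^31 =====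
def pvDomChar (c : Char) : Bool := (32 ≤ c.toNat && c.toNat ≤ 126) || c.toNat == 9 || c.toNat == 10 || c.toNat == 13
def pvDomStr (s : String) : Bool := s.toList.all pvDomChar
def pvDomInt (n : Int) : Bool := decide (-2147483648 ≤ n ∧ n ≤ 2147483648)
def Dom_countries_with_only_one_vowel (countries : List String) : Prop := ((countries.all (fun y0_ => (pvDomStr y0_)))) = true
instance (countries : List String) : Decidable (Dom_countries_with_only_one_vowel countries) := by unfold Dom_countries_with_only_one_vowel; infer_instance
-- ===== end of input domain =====

-- B replaces A's per-country set construction and set subtraction by a single-pass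
-- state machine with early exit on a second distinct vowel (objective: alternative).
-- ===== PORT A =====
def countries_with_only_one_vowel (countries : List String) : List String :=
  let vowels : PySem.Set Char := PySem.Set.ofList "aeiou".toList
  let len_vowels : Int := PySem.Set.len vowels
  countries.foldl (fun results country =>
    let number_of_vowels : Int :=
      len_vowels - PySem.Set.len (PySem.Set.diff vowels (PySem.Set.ofList (PySem.Str.lower country).toList))
    if number_of_vowels = 1 then results ++ [country] else results) []

-- ===== PORT B =====
def vowelsB : List Char := ['a', 'e', 'i', 'o', 'u']

-- the 'for ch in chars' loop with early 'return False' and final 'seen is not None'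
def singleVowel : List Char → Option Char → Bool
  | [], seen => seen.isSome
  | ch :: rest, seen =>
    if ch ∈ vowelsB then
      match seen with
      | none => singleVowel rest (some ch)
      | some s => if ch ≠ s then false else singleVowel rest (some s)
    else singleVowel rest seen

def countries_with_only_one_vowel_alt (countries : List String) : List String :=
  countries.filter (fun c => singleVowel (PySem.Str.lower c).toList none)

-- ===== PRECONDITION & SPEC =====
def Spec_countries_with_only_one_vowel (countries : List String) (out : List String) : Prop := out = countries_with_only_one_vowel_alt countries
instance (countries : List String) (out : List String) : Decidable (Spec_countries_with_only_one_vowel countries out) := by unfold Spec_countries_with_only_one_vowel; infer_instance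

-- ===== CLAIM =====
def Claim_equal_countries_with_only_one_vowel : Prop := ∀ (countries : List String), Dom_countries_with_only_one_vowel countries → Spec_countries_with_only_one_vowel countries (countries_with_only_one_vowel countries)

-- ===== LEMMAS AND PROOFS =====

-- singleVowel with state 'some s' succeeds iff every vowel of the rest equals s
lemma singleVowel_some (l : List Char) (s : Char) :
    singleVowel l (some s) = true ↔ ∀ c ∈ l, c ∈ vowelsB → c = s := by
  induction l with
  | nil => simp [singleVowel]
  | cons ch rest ih =>
    by_cases hv : ch ∈ vowelsB
    · by_cases he : ch = s
      · subst he
        rw [singleVowel, if_pos hv, if_neg (fun h => h rfl)]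
        simp only [ih, List.mem_cons]
        constructor
        · rintro h c (rfl | hc) hcv
          · rfl
          · exact h c hc hcv
        · intro h c hc hcv; exact h c (Or.inr hc) hcv
      · rw [singleVowel, if_pos hv, if_pos he]
        simp only [false_iff, Bool.false_eq_true]
        intro h; exact he (h ch (List.mem_cons_self) hv)
    · rw [singleVowel, if_neg hv]
      simp only [ih, List.mem_cons]
      constructor
      · rintro h c (rfl | hc) hcv
        · exact absurd hcv hv
        · exact h c hc hcv
      · intro h c hc hcv; exact h c (Or.inr hc) hcv

-- singleVowel from the initial state succeeds iff some vowel occurs and all vowels agree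
lemma singleVowel_none (l : List Char) :
    singleVowel l none = true ↔ ∃ v ∈ l, v ∈ vowelsB ∧ ∀ c ∈ l, c ∈ vowelsB → c = v := by
  induction l with
  | nil => simp [singleVowel]
  | cons ch rest ih =>
    by_cases hv : ch ∈ vowelsB
    · rw [singleVowel, if_pos hv]
      rw [singleVowel_some]
      constructor
      · intro h
        refine ⟨ch, List.mem_cons_self, hv, ?_⟩
        rintro c hc hcv
        rcases List.mem_cons.1 hc with rfl | hc
        · rfl
        · exact h c hc hcv
      · rintro ⟨v, hvl, hvv, hall⟩
        have hveq : v = ch := by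
          rcases List.mem_cons.1 hvl with rfl | hvl
          · rfl
          · exact (hall ch List.mem_cons_self hv).symm
        subst hveq
        intro c hc hcv
        exact hall c (List.mem_cons_of_mem _ hc) hcv
    · rw [singleVowel, if_neg hv, ih]
      constructor
      · rintro ⟨v, hvl, hvv, hall⟩
        refine ⟨v, List.mem_cons_of_mem _ hvl, hvv, ?_⟩
        intro c hc hcv
        rcases List.mem_cons.1 hc with rfl | hc
        · exact absurd hcv hv
        · exact hall c hc hcv
      · rintro ⟨v, hvl, hvv, hall⟩
        have hvl' : v ∈ rest := by
          rcases List.mem_cons.1 hvl with rfl | hvl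
          · exact absurd hvv hv
          · exact hvl
        exact ⟨v, hvl', hvv, fun c hc hcv => hall c (List.mem_cons_of_mem _ hc) hcv⟩

-- the 'some vowel, all vowels equal' condition restated with quantifiers over the vowel alphabet
lemma flip_exists (low : List Char) :
    (∃ v ∈ low, v ∈ vowelsB ∧ ∀ c ∈ low, c ∈ vowelsB → c = v) ↔
      (∃ v ∈ vowelsB, v ∈ low ∧ ∀ c ∈ vowelsB, c ∈ low → c = v) := by
  constructor <;> rintro ⟨v, h1, h2, h3⟩ <;>
    exact ⟨v, h2, h1, fun c hc1 hc2 => h3 c hc2 hc1⟩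

-- A's per-country arithmetic test equals B's state-machine test
lemma cond_eq (low : List Char) :
    ((PySem.Set.len (PySem.Set.ofList "aeiou".toList) -
        PySem.Set.len (PySem.Set.diff (PySem.Set.ofList "aeiou".toList) (PySem.Set.ofList low)) = (1 : Int))
      ↔ singleVowel low none = true) := by
  have hv : PySem.Set.ofList "aeiou".toList = ['a', 'e', 'i', 'o', 'u'] := by decide
  rw [hv, singleVowel_none, flip_exists]
  by_cases ha : 'a' ∈ low <;> by_cases he : 'e' ∈ low <;> by_cases hi : 'i' ∈ low <;>
    by_cases ho : 'o' ∈ low <;> by_cases hu : 'u' ∈ low <;>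
    simp [PySem.Set.diff, PySem.Set.len, PySem.Set.mem_ofList, vowelsB, ha, he, hi, ho, hu]

-- ===== VERDICT =====
theorem countries_with_only_one_vowel_spec : Claim_equal_countries_with_only_one_vowel := by
  intro countries _
  unfold Spec_countries_with_only_one_vowel countries_with_only_one_vowel countries_with_only_one_vowel_alt
  rw [PySem.List.foldl_append_ite_eq_filter]
  rw [List.nil_append]
  refine List.filter_congr fun c _ => ?_
  rw [show (singleVowel (PySem.Str.lower c).toList none) =
        decide (singleVowel (PySem.Str.lower c).toList none = true) by simp]
  exact decide_eq_decide.mpr (cond_eq (PySem.Str.lower c).toList)
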